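-- pv_equiv track=rewrite | github.com/uday590/2105590_AI | Assignment-3/ai_asg3.py | result
-- ===== SOURCE A (Python) =====
-- def result(board, action, player):
--     # Update the board after a player makes a move
--     new_board = list(board)
--     new_board[action] = 'B' if player == 1 else 'W'
--
--     # Update the coins in continuity
--     for i in range(len(new_board)):
--         if new_board[i] == 'B' and (i > 0 and new_board[i - 1] == 'W'):
--             new_board[i] = 'W'
--         elif new_board[i] == 'W' and (i > 0 and new_board[i - 1] == 'B'):
--             new_board[i] = 'B'
--
--     return ''.join(new_board)
-- ===== SOURCE B (Python) =====
-- def result(board, action, player):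
--     # Run-based rewrite: place the move, then split the board into maximal runs
--     # of coin characters ('B'/'W') and fill each run with its first coin.
--     new = list(board)
--     new[action] = 'B' if player == 1 else 'W'
--     out = []
--     i, n = 0, len(new)
--     while i < n:
--         c = new[i]
--         if c in ('B', 'W'):
--             j = i + 1
--             while j < n and new[j] in ('B', 'W'):
--                 j += 1
--             out.append(c * (j - i))
--             i = j
--         else:
--             out.append(c)
--             i += 1
--     return ''.join(out)
-- ===== Notes on version B (the rewrite author's own statement) =====
-- stated objective: alternative
-- what changed: Replaces A's per-index propagation loop (which rewrites each coin to match its already-updated left neighbour) with a run-partition pass: after placing the move, the board is split into maximal runs of coin characters and each run is emitted as its first coin repeated, with non-coin characters copied through.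
import Mathlib
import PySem

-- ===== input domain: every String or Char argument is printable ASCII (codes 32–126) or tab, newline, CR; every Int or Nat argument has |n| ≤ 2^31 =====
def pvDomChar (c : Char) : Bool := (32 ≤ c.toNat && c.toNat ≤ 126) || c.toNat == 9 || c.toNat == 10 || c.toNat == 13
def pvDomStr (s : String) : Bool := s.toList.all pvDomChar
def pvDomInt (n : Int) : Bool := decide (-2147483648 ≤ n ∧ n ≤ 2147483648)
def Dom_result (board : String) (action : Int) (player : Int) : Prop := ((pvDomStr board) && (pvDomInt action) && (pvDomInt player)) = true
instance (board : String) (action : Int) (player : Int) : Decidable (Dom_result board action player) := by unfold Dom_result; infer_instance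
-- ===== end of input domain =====

-- B replaces A's per-index left-neighbour propagation loop with a run-partition pass
-- (fill each maximal run of coin characters with its first coin); objective: alternative.

-- ===== PORT A =====
-- one iteration of A's for-loop body at index i on the current list
def resultStep (l : List Char) (i : Int) : List Char :=
  if PySem.List.pyGetD l i ' ' == 'B' && (decide (0 < i) && (PySem.List.pyGetD l (i - 1) ' ' == 'W')) then
    PySem.List.pySetD l i 'W'
  else if PySem.List.pyGetD l i ' ' == 'W' && (decide (0 < i) && (PySem.List.pyGetD l (i - 1) ' ' == 'B')) then
    PySem.List.pySetD l i 'B'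
  else l

def result (board : String) (action : Int) (player : Int) : String :=
  let nb := PySem.List.pySetD board.toList action (if player == 1 then 'B' else 'W')
  String.mk ((PySem.List.pyRange 0 (PySem.List.len nb) 1).foldl resultStep nb)

-- ===== PORT B =====
def coinQ (c : Char) : Bool := c == 'B' || c == 'W'

-- Source B's outer while-loop: one maximal run of coins (inner while = takeWhile) filled
-- with its first coin, a non-coin character copied through
def fillRuns : List Char → List Char
  | [] => []
  | c :: cs =>
    if coinQ c then
      List.replicate ((cs.takeWhile coinQ).length + 1) c ++ fillRuns (cs.dropWhile coinQ)
    else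
      c :: fillRuns cs
termination_by l => l.length
decreasing_by
  · simpa using Nat.lt_succ_of_le (List.length_dropWhile_le coinQ cs)
  · simp

def result_alt (board : String) (action : Int) (player : Int) : String :=
  let nb := PySem.List.pySetD board.toList action (if player == 1 then 'B' else 'W')
  String.mk (fillRuns nb)

-- ===== PRECONDITION & SPEC =====
-- Pre_ excludes exactly the inputs where `new_board[action] = …` raises IndexError in both programs.
def Pre_result (board : String) (action : Int) (player : Int) : Prop :=
  PySem.Raise.InRange board.toList.length action
instance (board : String) (action : Int) (player : Int) : Decidable (Pre_result board action player) := by unfold Pre_result; infer_instance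
def pvWitness_result : String × Int × Int := ("xBWWx", 2, 1)

def Spec_result (board : String) (action : Int) (player : Int) (out : String) : Prop := out = result_alt board action player
instance (board : String) (action : Int) (player : Int) (out : String) : Decidable (Spec_result board action player out) := by unfold Spec_result; infer_instance

-- ===== CLAIM (what is proved, stated in full; the proofs are below) =====
def Claim_equal_result : Prop := ∀ (board : String) (action : Int) (player : Int), Dom_result board action player → Pre_result board action player → Spec_result board action player (result board action player)

-- ===== LEMMAS AND PROOFS =====

-- proof-only structural rendering of A's loop: the char at each position given the
-- (already-updated) previous char
def nextChar (prev : Option Char) (c : Char) : Char :=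
  match prev with
  | none => c
  | some p => if c == 'B' && p == 'W' then 'W' else if c == 'W' && p == 'B' then 'B' else c

def fillF : Option Char → List Char → List Char
  | _, [] => []
  | prev, c :: cs => nextChar prev c :: fillF (some (nextChar prev c)) cs

theorem getD_append_length {pre cs : List Char} {c d : Char} :
    (pre ++ c :: cs).getD pre.length d = c := by
  simp [List.getD]

theorem pyGetD_pred {pre rest : List Char} {p : Char} (h : pre.getLast? = some p) :
    PySem.List.pyGetD (pre ++ rest) ((pre.length : Int) - 1) ' ' = p := by
  obtain ⟨l', rfl⟩ := List.getLast?_eq_some_iff.mp h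
  have h1 : ((l' ++ [p]).length : Int) - 1 = ((l'.length : Nat) : Int) := by
    simp
  rw [h1, PySem.List.pyGetD_natCast]
  have : l' ++ [p] ++ rest = l' ++ p :: rest := by simp
  rw [this, getD_append_length]

theorem stepA_eq (pre cs : List Char) (c : Char) :
    resultStep (pre ++ c :: cs) (pre.length : Int)
      = pre ++ nextChar pre.getLast? c :: cs := by
  have hget : PySem.List.pyGetD (pre ++ c :: cs) (pre.length : Int) ' ' = c := by
    rw [PySem.List.pyGetD_natCast]; exact getD_append_length
  have hset : ∀ v, PySem.List.pySetD (pre ++ c :: cs) (pre.length : Int) v = pre ++ v :: cs := by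
    intro v
    rw [PySem.List.pySetD, PySem.List.pySet?_natCast _ _ _ (by simp)]
    simp
  cases hpre : pre.getLast? with
  | none =>
    have : pre = [] := List.getLast?_eq_none_iff.mp hpre
    subst this
    simp [resultStep, nextChar]
  | some p =>
    have hne : pre ≠ [] := by
      intro h; subst h; simp at hpre
    have hpos : (decide ((0:Int) < (pre.length : Int))) = true := by
      simp [Int.natCast_pos, List.length_pos_iff, hne]
    have hprev : PySem.List.pyGetD (pre ++ c :: cs) ((pre.length : Int) - 1) ' ' = p :=
      pyGetD_pred hpre
    simp only [resultStep, hget, hprev, hpos, hset, Bool.true_and, nextChar]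
    by_cases h1 : (c == 'B' && p == 'W') = true
    · simp [h1]
    · by_cases h2 : (c == 'W' && p == 'B') = true
      · simp [h1, h2]
      · simp [h1, h2]

theorem loopA_eq (rest : List Char) : ∀ (pre : List Char),
    (PySem.List.pyRange (pre.length : Int) ((pre.length : Int) + rest.length) 1).foldl resultStep (pre ++ rest)
      = pre ++ fillF pre.getLast? rest := by
  induction rest with
  | nil =>
    intro pre
    simp [PySem.List.pyRange_one_eq_nil, fillF]
  | cons c cs ih =>
    intro pre
    rw [PySem.List.pyRange_one_cons (by simp only [List.length_cons]; push_cast; omega)]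
    simp only [List.foldl_cons, stepA_eq]
    have hih := ih (pre ++ [nextChar pre.getLast? c])
    have hcast1 : (((pre ++ [nextChar pre.getLast? c]).length : Nat) : Int) = (pre.length : Int) + 1 := by
      simp
    have hcast2 : (pre.length : Int) + 1 + (cs.length : Int) = (pre.length : Int) + ((c :: cs).length : Int) := by
      simp only [List.length_cons]; push_cast; ring
    rw [hcast1, hcast2, List.append_assoc, List.singleton_append] at hih
    rw [hih]
    simp [fillF]

theorem fillF_notcoin {p : Char} (h : coinQ p = false) (cs : List Char) :
    fillF (some p) cs = fillF none cs := by
  cases cs with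
  | nil => rfl
  | cons c cs =>
    have hB : (p == 'W') = false := by
      simp [coinQ] at h ⊢; intro hh; subst hh; simp at h
    have hW : (p == 'B') = false := by
      simp [coinQ] at h ⊢; intro hh; subst hh; simp at h
    simp [fillF, nextChar, hB, hW]

theorem fillF_coin {p : Char} (h : coinQ p = true) : ∀ (cs : List Char),
    fillF (some p) cs
      = List.replicate (cs.takeWhile coinQ).length p ++ fillF none (cs.dropWhile coinQ) := by
  intro cs
  induction cs generalizing p with
  | nil => simp [fillF]
  | cons c cs ih =>
    by_cases hc : coinQ c = true
    · have hcp : nextChar (some p) c = p := by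
        simp only [coinQ, Bool.or_eq_true, beq_iff_eq] at h hc
        rcases h with h | h <;> rcases hc with hc | hc <;> subst h <;> subst hc <;> rfl
      rw [List.takeWhile_cons_of_pos hc, List.dropWhile_cons_of_pos hc]
      simp only [fillF, hcp, List.length_cons, List.replicate_succ, List.cons_append]
      rw [ih h]
    · have hcp : nextChar (some p) c = c := by
        simp only [coinQ, Bool.or_eq_true, beq_iff_eq, not_or] at hc
        simp [nextChar, hc.1, hc.2]
      rw [List.takeWhile_cons_of_neg (by simp [hc]), List.dropWhile_cons_of_neg (by simp [hc])]
      simp only [List.length_nil, List.replicate_zero, List.nil_append, fillF, hcp]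
      rfl

theorem fillRuns_eq (l : List Char) : fillRuns l = fillF none l := by
  induction l using fillRuns.induct with
  | case1 => rw [fillRuns]; rfl
  | case2 c cs hc ih =>
    rw [fillRuns]
    simp only [hc, if_true]
    rw [ih]
    simp only [fillF, nextChar]
    rw [fillF_coin hc]
    simp [List.replicate_succ]
  | case3 c cs hc ih =>
    rw [fillRuns]
    simp only [hc, if_false, Bool.false_eq_true]
    have hnone : fillF none (c :: cs) = c :: fillF (some c) cs := rfl
    rw [hnone, fillF_notcoin (by simpa using hc), ih]

-- ===== VERDICT (by name: the statement is the Claim_ definition above) =====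
theorem result_spec : Claim_equal_result := by
  intro board action player _ _
  unfold Spec_result result result_alt
  have h := loopA_eq (PySem.List.pySetD board.toList action (if player == 1 then 'B' else 'W')) []
  simp only [List.length_nil, Nat.cast_zero, zero_add, List.nil_append, List.getLast?_nil] at h
  simp only [PySem.List.len_eq]
  rw [h, fillRuns_eq]
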